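-- pv_equiv track=rewrite | github.com/bled1908/SmartInterviews-DSA | Team-based-contest-3/sum_and_xor.py | count_valid_x
-- ===== SOURCE A (Python) =====
-- def count_valid_x(n):
--     if n == 0:
--         return 0  # No positive integers satisfy the condition for N = 0
--     count = 0
--     temp_n = n  # Use temporary variable to avoid modifying the original n
--     while temp_n:
--         if (temp_n & 1) == 0:
--             count += 1
--         temp_n >>= 1
--     return (1 << count) - 1  # Subtract 1 to exclude X = 0
-- ===== SOURCE B (Python) =====
-- def count_valid_x(n):
--     # Recursive descent over the bits: the answer is accumulated multiplicatively
--     # (each zero bit doubles the running result and adds 1); no count, no shift.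
--     if n == 0:
--         return 0
--     r = count_valid_x(n >> 1)
--     return r if n & 1 else 2 * r + 1
-- ===== Notes on version B (the rewrite author's own statement) =====
-- stated objective: alternative
-- what changed: Replaces A's two-stage scheme (a while-loop that counts zero bits, then a final (1<<count)-1 exponentiation) with a direct structural recursion on n>>1 that accumulates the answer itself (r -> 2*r+1 on each zero bit), maintaining no counter and performing no final shift; the n==0 guard is just the recursion's base case.
import Mathlib
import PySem

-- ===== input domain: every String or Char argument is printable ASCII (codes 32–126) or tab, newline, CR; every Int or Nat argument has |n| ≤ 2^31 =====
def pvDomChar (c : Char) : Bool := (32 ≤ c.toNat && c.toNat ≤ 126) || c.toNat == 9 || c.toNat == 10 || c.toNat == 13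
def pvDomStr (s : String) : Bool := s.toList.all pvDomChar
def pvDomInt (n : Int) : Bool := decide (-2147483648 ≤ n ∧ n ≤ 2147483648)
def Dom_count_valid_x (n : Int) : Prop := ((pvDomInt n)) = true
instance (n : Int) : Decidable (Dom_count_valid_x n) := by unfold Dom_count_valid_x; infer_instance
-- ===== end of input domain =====

-- B replaces A's count-then-exponentiate while-loop with a structural recursion on n >> 1
-- that accumulates the answer itself (r -> 2*r+1 on each zero bit); no counter, no final shift.

-- ===== PORT A =====
-- A's while loop: temp_n runs down by >>= 1, counting clear bits (on the n ≥ 0 domain, temp_n : Nat).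
def pvLoopA (t : Nat) (count : Nat) : Nat :=
  if t = 0 then count
  else pvLoopA (t / 2) (if t % 2 = 0 then count + 1 else count)
decreasing_by exact Nat.div_lt_self (Nat.pos_of_ne_zero (by assumption)) (by norm_num)

def count_valid_x (n : Int) : Int :=
  if n = 0 then 0
  else (2 ^ (pvLoopA n.toNat 0) : Int) - 1

-- ===== PORT B =====
-- B's recursion: base case 0, then r if odd else 2*r+1.
def pvG (t : Nat) : Int :=
  if t = 0 then 0
  else
    let r := pvG (t / 2)
    if t % 2 = 1 then r else 2 * r + 1
decreasing_by exact Nat.div_lt_self (Nat.pos_of_ne_zero (by assumption)) (by norm_num)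

def count_valid_x_alt (n : Int) : Int := pvG n.toNat

-- ===== PRECONDITION & SPEC =====
-- A's while loop never terminates for negative n (temp_n >>= 1 stalls at -1), and B's
-- recursion likewise does not return there, so Pre_ is n ≥ 0.
def Pre_count_valid_x (n : Int) : Prop := 0 ≤ n
instance (n : Int) : Decidable (Pre_count_valid_x n) := by unfold Pre_count_valid_x; infer_instance
def pvWitness_count_valid_x : Int := 6

def Spec_count_valid_x (n : Int) (out : Int) : Prop := out = count_valid_x_alt n
instance (n : Int) (out : Int) : Decidable (Spec_count_valid_x n out) := by unfold Spec_count_valid_x; infer_instance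

-- ===== CLAIM (what is proved, stated in full; the proofs are below) =====
def Claim_equal_count_valid_x : Prop := ∀ (n : Int), Dom_count_valid_x n → Pre_count_valid_x n → Spec_count_valid_x n (count_valid_x n)

-- ===== LEMMAS AND PROOFS =====
theorem pvLoopA_shift (t : Nat) : ∀ c, pvLoopA t c = c + pvLoopA t 0 := by
  induction t using Nat.strong_induction_on with
  | _ t ih =>
    intro c
    unfold pvLoopA
    split
    · simp
    · have hlt := Nat.div_lt_self (Nat.pos_of_ne_zero (by assumption)) (show 1 < 2 by norm_num)
      rw [ih (t / 2) hlt, ih (t / 2) hlt (if t % 2 = 0 then 0 + 1 else 0)]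
      split <;> omega

theorem pvG_eq (t : Nat) : pvG t = (2 ^ (pvLoopA t 0) : Int) - 1 := by
  induction t using Nat.strong_induction_on with
  | _ t ih =>
    unfold pvG pvLoopA
    split
    · simp
    · have hlt := Nat.div_lt_self (Nat.pos_of_ne_zero (by assumption)) (show 1 < 2 by norm_num)
      rw [ih (t / 2) hlt, pvLoopA_shift (t / 2)]
      have h2 : t % 2 < 2 := Nat.mod_lt t (by norm_num)
      by_cases h : t % 2 = 1
      · simp [h]
      · have h0 : t % 2 = 0 := by omega
        simp [h0, pvLoopA_shift (t / 2) 1, pow_add]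
        ring

-- ===== VERDICT (by name: the statement is the Claim_ definition above) =====
theorem count_valid_x_spec : Claim_equal_count_valid_x := by
  intro n _ hpre
  unfold Spec_count_valid_x count_valid_x count_valid_x_alt
  rw [pvG_eq]
  split
  · subst n; simp [pvLoopA]
  · rfl
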